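-- pv_equiv track=rewrite | github.com/IlyaViz/react-django-site-parody | telegram-bot/utils.py | get_list_difference
-- ===== SOURCE A (Python) =====
-- def get_list_difference(first_list, second_list):
--     list_length = len(first_list)
--     for shift in range(list_length):
--         first_part = first_list[:list_length-shift]
--         second_part = second_list[shift:]
--         if first_part == second_part:
--             return second_list[:shift]
--     return second_list
-- ===== SOURCE B (Python) =====
-- def get_list_difference(first_list, second_list):
--     # KMP prefix-function over first_list + [None] + second_list: the final
--     # border length k is the longest overlap (suffix of second == prefix of first),
--     # so the smallest matching shift is n - k.
--     n = len(first_list)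
--     if n == 0 or len(second_list) != n:
--         return second_list
--     s = first_list + [None] + second_list
--     pi = [0] * len(s)
--     k = 0
--     for i in range(1, len(s)):
--         while k > 0 and s[i] != s[k]:
--             k = pi[k - 1]
--         if s[i] == s[k]:
--             k += 1
--         pi[i] = k
--     return second_list[:n - k]
-- ===== Notes on version B (the rewrite author's own statement) =====
-- stated objective: faster
-- what changed: Replaces the quadratic shift-by-shift slice comparison with a single KMP prefix-function pass over first_list + [sentinel] + second_list, reading the smallest aligning shift off the final border length.
import Mathlib
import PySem

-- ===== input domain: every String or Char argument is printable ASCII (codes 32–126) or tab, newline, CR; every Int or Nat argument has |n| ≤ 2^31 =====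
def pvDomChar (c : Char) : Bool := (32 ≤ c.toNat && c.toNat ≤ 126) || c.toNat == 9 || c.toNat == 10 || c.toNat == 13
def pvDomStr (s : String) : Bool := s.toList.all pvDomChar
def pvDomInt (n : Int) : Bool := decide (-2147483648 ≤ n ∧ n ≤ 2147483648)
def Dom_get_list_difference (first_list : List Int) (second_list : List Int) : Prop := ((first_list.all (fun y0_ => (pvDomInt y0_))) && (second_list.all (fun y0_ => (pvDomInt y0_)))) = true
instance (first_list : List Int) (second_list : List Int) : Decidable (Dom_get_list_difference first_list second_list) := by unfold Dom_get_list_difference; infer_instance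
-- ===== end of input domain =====

-- B replaces A's quadratic shift-by-shift slice comparison with one KMP
-- prefix-function pass over first_list ++ [sentinel] ++ second_list (objective: faster).

-- ===== PORT A =====
-- for shift in range(list_length): compare first_list[:list_length-shift] with second_list[shift:]
def gldLoop (first_list : List Int) (second_list : List Int) (shift : Nat) : List Int :=
  if h : shift < first_list.length then
    let first_part := PySem.List.slice first_list none (some ((first_list.length : Int) - (shift : Int)))
    let second_part := PySem.List.slice second_list (some ((shift : Int))) none
    if first_part = second_part then PySem.List.slice second_list none (some ((shift : Int)))
    else gldLoop first_list second_list (shift + 1)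
  else second_list
termination_by first_list.length - shift

def get_list_difference (first_list : List Int) (second_list : List Int) : List Int :=
  gldLoop first_list second_list 0

-- ===== PORT B =====
-- s[i] for an in-range nonnegative index (exact there): List.getD
def sAt (s : List (Option Int)) (i : Nat) : Option Int := s.getD i none

-- while k > 0 and s[i] != s[k]: k = pi[k-1]   (fuel = initial k always suffices:
-- each step strictly decreases k, see kmpFall_fuel_irrel below)
def kmpFall (s : List (Option Int)) (pi : List Nat) (c : Option Int) (fuel : Nat) (k : Nat) : Nat :=
  match fuel with
  | 0 => k
  | fuel + 1 => if 0 < k ∧ c ≠ sAt s k then kmpFall s pi c fuel (pi.getD (k - 1) 0) else k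

-- for i in range(1, len(s)): the while loop, the conditional increment, pi[i] = k
def kmpGo (s : List (Option Int)) (pi : List Nat) (k : Nat) (i : Nat) : Nat :=
  if h : i < s.length then
    let k1 := kmpFall s pi (sAt s i) k k
    let k2 := if sAt s i = sAt s k1 then k1 + 1 else k1
    kmpGo s (pi.set i k2) k2 (i + 1)
  else k
termination_by s.length - i

def get_list_difference_alt (first_list : List Int) (second_list : List Int) : List Int :=
  let n := first_list.length
  if n = 0 ∨ second_list.length ≠ n then second_list
  else
    let s := first_list.map some ++ [none] ++ second_list.map some
    let k := kmpGo s (List.replicate s.length 0) 0 1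
    second_list.take (n - k)

-- ===== PRECONDITION & SPEC =====
def Spec_get_list_difference (first_list : List Int) (second_list : List Int) (out : List Int) : Prop := out = get_list_difference_alt first_list second_list
instance (first_list : List Int) (second_list : List Int) (out : List Int) : Decidable (Spec_get_list_difference first_list second_list out) := by unfold Spec_get_list_difference; infer_instance

-- ===== CLAIM (what is proved, stated in full; the proofs are below) =====
def Claim_equal_get_list_difference : Prop := ∀ (first_list : List Int) (second_list : List Int), Dom_get_list_difference first_list second_list → Spec_get_list_difference first_list second_list (get_list_difference first_list second_list)

-- ===== LEMMAS AND PROOFS =====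

-- j is a (possibly full) border of s: the length-j prefix equals the length-j suffix
def isPB (s : List (Option Int)) (j : Nat) : Prop :=
  j ≤ s.length ∧ s.take j = s.drop (s.length - j)

-- m is the longest PROPER border of s
def MaxB (s : List (Option Int)) (m : Nat) : Prop :=
  m < s.length ∧ isPB s m ∧ ∀ j, j < s.length → isPB s j → j ≤ m

theorem isPB_zero (s : List (Option Int)) : isPB s 0 := by
  constructor
  · omega
  · simp

theorem pb_trans {s : List (Option Int)} {k j : Nat}
    (hk : isPB s k) (hj : isPB (s.take k) j) : isPB s j := by
  obtain ⟨hk1, hk2⟩ := hk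
  obtain ⟨hj1, hj2⟩ := hj
  rw [List.length_take] at hj1
  have hjk : j ≤ k := le_trans hj1 (min_le_left _ _)
  refine ⟨le_trans hjk hk1, ?_⟩
  have h1 : s.take j = (s.take k).take j := by
    rw [List.take_take, Nat.min_eq_left hjk]
  have h2 : (s.take k).drop (k - j) = s.drop (s.length - j) := by
    rw [hk2, List.drop_drop]
    congr 1
    omega
  have h3 : (s.take k).length - j = k - j := by
    rw [List.length_take]
    omega
  rw [h1, hj2, h3, h2]

theorem pb_down {s : List (Option Int)} {k j : Nat}
    (hk : isPB s k) (hj : isPB s j) (hjk : j ≤ k) : isPB (s.take k) j := by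
  obtain ⟨hk1, hk2⟩ := hk
  obtain ⟨hj1, hj2⟩ := hj
  refine ⟨by rw [List.length_take]; omega, ?_⟩
  have h1 : (s.take k).take j = s.take j := by
    rw [List.take_take, Nat.min_eq_left hjk]
  have h3 : (s.take k).length - j = k - j := by
    rw [List.length_take]; omega
  have h2 : (s.take k).drop (k - j) = s.drop (s.length - j) := by
    rw [hk2, List.drop_drop]
    congr 1
    omega
  rw [h1, hj2, h3, h2]

-- border extension: (j+1)-border of s' ++ [c] ↔ j-border of s' and the next char matches
theorem pb_ext {s' : List (Option Int)} {c : Option Int} {j : Nat} (hj : j ≤ s'.length) :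
    isPB (s' ++ [c]) (j + 1) ↔ (isPB s' j ∧ (s' ++ [c]).getD j none = c) := by
  have hlen : (s' ++ [c]).length = s'.length + 1 := by simp
  have hjlt : j < (s' ++ [c]).length := by omega
  have hget : (s' ++ [c]).getD j none = (s' ++ [c])[j] := List.getD_eq_getElem _ none hjlt
  have htake : (s' ++ [c]).take (j + 1) = s'.take j ++ [(s' ++ [c])[j]] := by
    rw [List.take_add_one, List.take_append_of_le_length hj]
    simp [List.getElem?_eq_getElem hjlt]
  have hdrop : (s' ++ [c]).drop ((s' ++ [c]).length - (j + 1)) = s'.drop (s'.length - j) ++ [c] := by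
    rw [hlen]
    have h1 : s'.length + 1 - (j + 1) = s'.length - j := by omega
    rw [h1, List.drop_append_of_le_length (by omega)]
  constructor
  · rintro ⟨h1, h2⟩
    rw [htake, hdrop, List.append_singleton_inj] at h2
    exact ⟨⟨hj, h2.1⟩, by rw [hget, h2.2]⟩
  · rintro ⟨⟨h1, h2⟩, h3⟩
    refine ⟨by omega, ?_⟩
    rw [htake, hdrop, List.append_singleton_inj]
    exact ⟨h2, by rw [← hget, h3]⟩

theorem maxB_ub {s' : List (Option Int)} {c : Option Int} {k : Nat}
    (hm : MaxB s' k) : ∀ j, isPB (s' ++ [c]) j → j < s'.length + 1 → j ≤ k + 1 := by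
  rintro (_ | j) hpb hlt
  · omega
  · have hj : j ≤ s'.length := by omega
    obtain ⟨h1, _⟩ := (pb_ext hj).mp hpb
    have := hm.2.2 j (by omega) h1
    omega

theorem kmpFall_correct {s : List (Option Int)} {pi : List Nat} {i : Nat}
    (hi1 : 1 ≤ i) (hi2 : i < s.length)
    (hpi : ∀ j, j < i → MaxB (s.take (j + 1)) (pi.getD j 0)) :
    ∀ fuel k, k ≤ fuel → isPB (s.take i) k → k < i →
    (∀ j, isPB (s.take i ++ [sAt s i]) j → j < i + 1 → j ≤ k + 1) →
    (isPB (s.take i) (kmpFall s pi (sAt s i) fuel k) ∧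
     kmpFall s pi (sAt s i) fuel k < i ∧
     (∀ j, isPB (s.take i ++ [sAt s i]) j → j < i + 1 → j ≤ kmpFall s pi (sAt s i) fuel k + 1) ∧
     (kmpFall s pi (sAt s i) fuel k = 0 ∨ sAt s (kmpFall s pi (sAt s i) fuel k) = sAt s i)) := by
  have hleni : (s.take i).length = i := by
    rw [List.length_take]; omega
  intro fuel
  induction fuel with
  | zero =>
    intro k hk hpb hki hub
    have hk0 : k = 0 := by omega
    subst hk0
    exact ⟨hpb, hki, hub, Or.inl rfl⟩
  | succ fuel ih =>
    intro k hk hpb hki hub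
    rw [kmpFall]
    by_cases hcond : 0 < k ∧ sAt s i ≠ sAt s k
    · rw [if_pos hcond]
      -- k' = pi[k-1], the longest proper border of s.take k
      have hkpi := hpi (k - 1) (by omega)
      have hkk : k - 1 + 1 = k := by omega
      rw [hkk] at hkpi
      have hlenk : (s.take k).length = k := by
        rw [List.length_take]; omega
      set k' := pi.getD (k - 1) 0 with hk'
      have hk'lt : k' < k := by
        have := hkpi.1; omega
      have htt : (s.take i).take k = s.take k := by
        rw [List.take_take, Nat.min_eq_left (by omega)]
      have hpb' : isPB (s.take i) k' := by
        apply pb_trans hpb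
        rw [htt]; exact hkpi.2.1
      -- upper bound is maintained: j = k+1 is impossible (mismatch), j ≤ k chains down
      have hub' : ∀ j, isPB (s.take i ++ [sAt s i]) j → j < i + 1 → j ≤ k' + 1 := by
        rintro (_ | j) hj hjlt
        · omega
        · have hjle' : j ≤ (s.take i).length := by
            have := hub (j+1) hj hjlt
            rw [hleni]; omega
          obtain ⟨hj1, hj2⟩ := (pb_ext hjle').mp hj
          have hjk1 : j + 1 ≤ k + 1 := hub (j+1) hj hjlt
          have hjne : j + 1 ≠ k + 1 := by
            intro he
            have hjk : j = k := by omega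
            subst hjk
            have : (s.take i ++ [sAt s i]).getD j none = sAt s j := by
              rw [List.getD_append _ _ _ _ (by omega)]
              simp only [sAt]
              simp [List.getD_eq_getElem?_getD, List.getElem?_take_of_lt (show j < i by omega)]
            rw [this] at hj2
            exact hcond.2 hj2.symm
          have hjk : j < k := by omega
          have : isPB ((s.take i).take k) j := pb_down hpb hj1 (by omega)
          rw [htt] at this
          have := hkpi.2.2 j (by omega) this
          omega
      exact ih k' (by omega) hpb' (by omega) hub'
    · rw [if_neg hcond]
      push_neg at hcond
      refine ⟨hpb, hki, hub, ?_⟩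
      by_cases hk0 : k = 0
      · exact Or.inl hk0
      · exact Or.inr (hcond (by omega)).symm

theorem kmpGo_correct {s : List (Option Int)} :
    ∀ m i pi k, s.length - i = m → 1 ≤ i → i ≤ s.length → pi.length = s.length →
    MaxB (s.take i) k →
    (∀ j, j < i → MaxB (s.take (j + 1)) (pi.getD j 0)) →
    MaxB s (kmpGo s pi k i) := by
  intro m
  induction m with
  | zero =>
    intro i pi k hm h1 h2 hlen hM hpi
    rw [kmpGo, dif_neg (by omega)]
    have hi : i = s.length := by omega
    rw [hi, List.take_length] at hM
    exact hM
  | succ m ih =>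
    intro i pi k hm h1 h2 hlen hM hpi
    have hi : i < s.length := by omega
    have hleni : (s.take i).length = i := by rw [List.length_take]; omega
    have hki : k < i := by have := hM.1; omega
    have hub : ∀ j, isPB (s.take i ++ [sAt s i]) j → j < i + 1 → j ≤ k + 1 := by
      intro j hj hjlt
      exact maxB_ub hM j hj (by omega)
    obtain ⟨hf1, hf2, hf3, hf4⟩ :=
      kmpFall_correct h1 hi hpi k k (le_refl k) hM.2.1 hki hub
    rw [kmpGo, dif_pos hi]
    set k1 := kmpFall s pi (sAt s i) k k with hk1def
    set k2 := if sAt s i = sAt s k1 then k1 + 1 else k1 with hk2def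
    have htsucc : s.take (i + 1) = s.take i ++ [sAt s i] := by
      rw [List.take_add_one, List.getElem?_eq_getElem hi,
        show sAt s i = s[i] from List.getD_eq_getElem s none hi]
      rfl
    have hlensucc : (s.take (i + 1)).length = i + 1 := by
      rw [List.length_take]; omega
    have hgetk1 : (s.take i ++ [sAt s i]).getD k1 none = sAt s k1 := by
      rw [List.getD_append _ _ _ _ (by omega)]
      simp only [sAt]
      simp [List.getD_eq_getElem?_getD, List.getElem?_take_of_lt hf2]
    have hstep : MaxB (s.take (i + 1)) k2 := by
      by_cases hc : sAt s i = sAt s k1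
      · rw [hk2def, if_pos hc]
        refine ⟨by omega, ?_, ?_⟩
        · rw [htsucc]
          exact (pb_ext (by omega)).mpr ⟨hf1, by rw [hgetk1, hc]⟩
        · intro j hjlt hjpb
          rw [htsucc] at hjpb
          have := hf3 j hjpb (by omega)
          omega
      · have hk10 : k1 = 0 := by
          rcases hf4 with h | h
          · exact h
          · exact absurd h.symm hc
        rw [hk2def, if_neg hc, hk10]
        refine ⟨by omega, isPB_zero _, ?_⟩
        intro j hjlt hjpb
        rw [htsucc] at hjpb
        have hj1 : j ≤ 1 := by
          have := hf3 j hjpb (by omega)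
          omega
        rcases Nat.lt_or_ge j 1 with h | h
        · omega
        · exfalso
          have hj : j = 1 := by omega
          subst hj
          obtain ⟨_, hg⟩ := (pb_ext (show 0 ≤ (s.take i).length by omega)).mp hjpb
          rw [hk10] at hgetk1 hc
          exact hc (hgetk1.symm.trans hg).symm
    refine ih (i + 1) (pi.set i k2) k2 (by omega) (by omega) (by omega)
      (by rw [List.length_set]; exact hlen) hstep ?_
    intro j hj
    by_cases hji : j = i
    · subst hji
      have : (pi.set j k2).getD j 0 = k2 := by
        simp [List.getD_eq_getElem?_getD, List.getElem?_set, show j < pi.length by omega]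
      rw [this]
      exact hstep
    · have : (pi.set i k2).getD j 0 = pi.getD j 0 := by
        simp [List.getD_eq_getElem?_getD, List.getElem?_set,
          (show ¬ i = j from fun h => hji h.symm)]
      rw [this]
      exact hpi j (by omega)

-- the sentinel caps every border of F ++ none :: S at |F|
theorem sent_bound {first second : List Int} (h : second.length = first.length)
    {j : Nat} (hpb : isPB (first.map some ++ [none] ++ second.map some) j)
    (hpr : j < (first.map some ++ [none] ++ second.map some).length) :
    j ≤ first.length := by
  by_contra hgt
  set s : List (Option Int) := first.map some ++ [none] ++ second.map some with hs
  have hFlen : (first.map some ++ [none]).length = first.length + 1 := by simp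
  have hslen : s.length = 2 * first.length + 1 := by
    simp [hs, h]; omega
  obtain ⟨hj1, hj2⟩ := hpb
  have e1 : (s.take j)[first.length]? = s[first.length]? :=
    List.getElem?_take_of_lt (by omega)
  have e2 : (s.drop (s.length - j))[first.length]? = s[(s.length - j) + first.length]? :=
    List.getElem?_drop
  have hsn : s[first.length]? = some none := by
    rw [hs, List.getElem?_append_left (by omega : first.length < (first.map some ++ [none]).length),
      List.getElem?_append_right (by simp : (first.map some).length ≤ first.length)]
    simp
  have hq1 : first.length + 1 ≤ (s.length - j) + first.length := by omega
  have hq2 : (s.length - j) + first.length < s.length := by omega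
  have hsq : ∃ y, s[(s.length - j) + first.length]? = some (some y) := by
    rw [hs, List.getElem?_append_right (by omega : (first.map some ++ [none]).length ≤ (s.length - j) + first.length)]
    have hr : (s.length - j) + first.length - (first.map some ++ [none]).length < second.length := by
      rw [hFlen]; omega
    rw [List.getElem?_map, List.getElem?_eq_getElem hr]
    exact ⟨_, rfl⟩
  obtain ⟨y, hy⟩ := hsq
  have := congrArg (fun l => l[first.length]?) hj2
  simp only at this
  rw [e1, e2, hsn, hy] at this
  simp at this

-- below the sentinel, borders of the concatenation are exactly the overlaps
theorem overlap_iff {first second : List Int} (h : second.length = first.length)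
    {j : Nat} (hj : j ≤ first.length) :
    isPB (first.map some ++ [none] ++ second.map some) j ↔
      first.take j = second.drop (first.length - j) := by
  set s : List (Option Int) := first.map some ++ [none] ++ second.map some with hs
  have hFlen : (first.map some ++ [none]).length = first.length + 1 := by simp
  have hslen : s.length = 2 * first.length + 1 := by
    simp [hs, h]; omega
  have htake : s.take j = (first.take j).map some := by
    rw [hs, List.take_append_of_le_length (by omega),
      List.take_append_of_le_length (by simp; omega), List.map_take]
  have hidx : s.length - j = (first.map some ++ [none]).length + (first.length - j) := by
    rw [hFlen]; omega
  have hdrop : s.drop (s.length - j) = (second.drop (first.length - j)).map some := by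
    rw [hs, hidx, List.drop_length_add_append, List.map_drop]
  constructor
  · rintro ⟨_, h2⟩
    rw [htake, hdrop] at h2
    exact List.map_injective_iff.mpr (Option.some_injective Int) h2
  · intro h2
    refine ⟨by omega, ?_⟩
    rw [htake, hdrop, h2]

-- unfold one iteration of A's loop, with the slices in take/drop form
theorem gldLoop_step {first second : List Int} {shift : Nat} (h : shift < first.length) :
    gldLoop first second shift =
      if first.take (first.length - shift) = second.drop shift then second.take shift
      else gldLoop first second (shift + 1) := by
  rw [gldLoop, dif_pos h]
  show (if PySem.List.slice first none (some ((first.length : Int) - (shift : Int))) =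
          PySem.List.slice second (some ((shift : Int))) none
        then PySem.List.slice second none (some ((shift : Int)))
        else gldLoop first second (shift + 1)) = _
  have h1 : (first.length : Int) - (shift : Int) = ((first.length - shift : Nat) : Int) := by
    omega
  rw [h1, PySem.List.slice_to_natCast, PySem.List.slice_from_natCast,
    PySem.List.slice_to_natCast]

-- A's loop falls through when no remaining shift matches
theorem gldLoop_no_match {first second : List Int} :
    ∀ m shift, first.length - shift = m →
    (∀ t, shift ≤ t → t < first.length →
      first.take (first.length - t) ≠ second.drop t) →
    gldLoop first second shift = second := by
  intro m
  induction m with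
  | zero =>
    intro shift hm _
    rw [gldLoop, dif_neg (by omega)]
  | succ m ih =>
    intro shift hm hno
    rw [gldLoop_step (by omega)]
    rw [if_neg (hno shift (le_refl _) (by omega))]
    exact ih (shift + 1) (by omega) (fun t ht1 ht2 => hno t (by omega) ht2)

-- A's loop returns second[:shift0] at the first matching shift
theorem gldLoop_match {first second : List Int} {shift0 : Nat}
    (h0 : shift0 < first.length)
    (hm : first.take (first.length - shift0) = second.drop shift0) :
    ∀ m shift, shift0 - shift = m → shift ≤ shift0 →
    (∀ t, shift ≤ t → t < shift0 → first.take (first.length - t) ≠ second.drop t) →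
    gldLoop first second shift = second.take shift0 := by
  intro m
  induction m with
  | zero =>
    intro shift hms hle _
    have : shift = shift0 := by omega
    subst this
    rw [gldLoop_step h0, if_pos hm]
  | succ m ih =>
    intro shift hms hle hno
    rw [gldLoop_step (by omega)]
    rw [if_neg (hno shift (le_refl _) (by omega))]
    exact ih (shift + 1) (by omega) (by omega) (fun t ht1 ht2 => hno t (by omega) ht2)

-- ===== VERDICT (by name: the statement is the Claim_ definition above) =====
theorem get_list_difference_spec : Claim_equal_get_list_difference := by
  intro first second _
  show gldLoop first second 0 = get_list_difference_alt first second
  by_cases h0 : first.length = 0 ∨ second.length ≠ first.length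
  · have hB : get_list_difference_alt first second = second := by
      show (if first.length = 0 ∨ second.length ≠ first.length then second else _) = second
      rw [if_pos h0]
    rw [hB]
    rcases h0 with h0 | h0
    · rw [gldLoop, dif_neg (by omega)]
    · apply gldLoop_no_match (first.length - 0) 0 rfl
      intro t _ ht heq
      have := congrArg List.length heq
      rw [List.length_take, List.length_drop] at this
      omega
  · push_neg at h0
    obtain ⟨hn, hsl⟩ := h0
    set s : List (Option Int) := first.map some ++ [none] ++ second.map some with hs
    set piv := List.replicate s.length 0 with hpiv
    set mB := kmpGo s piv 0 1 with hmB
    have hslen : s.length = 2 * first.length + 1 := by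
      simp [hs, hsl]; omega
    have hM1 : MaxB (s.take 1) 0 := by
      refine ⟨by rw [List.length_take]; omega, isPB_zero _, ?_⟩
      intro j hj _
      rw [List.length_take] at hj
      omega
    have hpi1 : ∀ j, j < 1 → MaxB (s.take (j + 1)) (piv.getD j 0) := by
      intro j hj
      have hj0 : j = 0 := by omega
      subst hj0
      have : piv.getD 0 0 = 0 := by
        rw [hpiv]
        simp [List.getD_eq_getElem?_getD, show 0 < s.length by omega]
      rw [this]
      exact hM1
    have hM : MaxB s mB :=
      kmpGo_correct (s.length - 1) 1 piv 0 rfl (le_refl _) (by omega) (by rw [hpiv]; simp) hM1 hpi1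
    have hmn : mB ≤ first.length := sent_bound hsl hM.2.1 hM.1
    have hmax : ∀ j, j ≤ first.length → first.take j = second.drop (first.length - j) → j ≤ mB := by
      intro j hj hm'
      exact hM.2.2 j (by omega) ((overlap_iff hsl hj).mpr hm')
    have hB : get_list_difference_alt first second = second.take (first.length - mB) := by
      show (if first.length = 0 ∨ second.length ≠ first.length then second
            else second.take (first.length - kmpGo s (List.replicate s.length 0) 0 1)) = _
      rw [if_neg (by push_neg; exact ⟨hn, hsl⟩), ← hpiv, ← hmB]
    rw [hB]
    clear_value mB
    rcases Nat.eq_zero_or_pos mB with hm0 | hm1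
    · rw [hm0, Nat.sub_zero, ← hsl, List.take_length]
      apply gldLoop_no_match (first.length - 0) 0 rfl
      intro t _ ht heq
      have ht' : first.length - (first.length - t) = t := by omega
      have := hmax (first.length - t) (by omega) (by rw [ht']; exact heq)
      omega
    · have hov : first.take mB = second.drop (first.length - mB) :=
        (overlap_iff hsl (by omega)).mp hM.2.1
      have hlt : first.length - mB < first.length := by omega
      have hm' : first.take (first.length - (first.length - mB)) = second.drop (first.length - mB) := by
        rw [show first.length - (first.length - mB) = mB by omega]
        exact hov
      refine gldLoop_match hlt hm' (first.length - mB) 0 rfl (by omega) ?_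
      intro t _ ht heq
      have ht' : first.length - (first.length - t) = t := by omega
      have := hmax (first.length - t) (by omega) (by rw [ht']; exact heq)
      omega
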